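-- pv_equiv track=rewrite | github.com/mmetsa/PythonProjects | tk2/exam.py | count_clumps
-- ===== SOURCE A (Python) =====
-- def count_clumps(nums: list) -> int:
--     """
--     Return the number of clumps in the given list.
--
--     Say that a "clump" in a list is a series of 2 or more adjacent elements of the same value.
--     count_clumps([1, 2, 2, 3, 4, 4]) → 2
--     count_clumps([1, 1, 2, 1, 1]) → 2
--     count_clumps([1, 1, 1, 1, 1]) → 1
--
--     :param nums: List of integers.
--     :return: Number of clumps.
--     """
--     last_number = ""
--     groups_count = 0
--     current_num_amt = 1
--     for a in nums:
--         if last_number == a: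
--             current_num_amt += 1
--         else:
--             last_number = a
--             if current_num_amt > 1:
--                 groups_count += 1
--                 current_num_amt = 1
--     if current_num_amt > 1:
--         groups_count += 1
--     return groups_count
-- ===== SOURCE B (Python) =====
-- def count_clumps(nums: list) -> int:
--     """
--     Return the number of clumps in the given list.
--
--     A "clump" is a run of 2 or more adjacent equal elements.
--     Scan by runs: when a pair of equal neighbours is found, count one clump
--     and skip past the whole run; no running tally of run length is kept.
--     """
--     count = 0
--     i = 0
--     n = len(nums)
--     while i + 1 < n:
--         if nums[i] == nums[i + 1]:
--             count += 1
--             v = nums[i]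
--             i += 2
--             while i < n and nums[i] == v:
--                 i += 1
--         else:
--             i += 1
--     return count
-- ===== Notes on version B (the rewrite author's own statement) =====
-- stated objective: simpler
-- what changed: Replaces A's three-variable state machine (sentinel last value, running run-length tally, end-of-loop fixup) with a run-skipping scan: on seeing an equal adjacent pair, count one clump and skip the rest of that run.
import Mathlib
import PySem

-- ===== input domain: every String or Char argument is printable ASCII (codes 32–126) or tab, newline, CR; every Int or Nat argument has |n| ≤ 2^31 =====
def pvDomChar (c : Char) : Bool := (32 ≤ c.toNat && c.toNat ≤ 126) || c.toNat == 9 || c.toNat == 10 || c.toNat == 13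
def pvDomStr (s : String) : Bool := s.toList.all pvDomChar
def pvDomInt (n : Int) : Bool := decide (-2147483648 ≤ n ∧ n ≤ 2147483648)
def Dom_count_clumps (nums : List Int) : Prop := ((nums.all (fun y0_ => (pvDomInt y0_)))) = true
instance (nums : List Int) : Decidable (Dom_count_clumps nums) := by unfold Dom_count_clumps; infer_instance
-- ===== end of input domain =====

-- B replaces A's state machine (sentinel last value + running run-length tally + end fixup)
-- with a run-skipping scan: count a clump at each equal adjacent pair, then skip the run.


-- ===== PORT A =====
-- last_number starts as the string sentinel "" (never equal to an int): modelled as `none`.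
def aStep (st : Option Int × Int × Int) (a : Int) : Option Int × Int × Int :=
  match st with
  | (last, cnt, groups) =>
    if last = some a then (last, cnt + 1, groups)
    else (some a, if cnt > 1 then 1 else cnt, if cnt > 1 then groups + 1 else groups)

def count_clumps (nums : List Int) : Int :=
  match nums.foldl aStep (none, 1, 0) with
  | (_, cnt, groups) => if cnt > 1 then groups + 1 else groups

-- ===== PORT B =====
-- run-skipping scan (B's inner `while` that skips the rest of a run is dropWhile)
def altGo : List Int → Int
  | [] => 0
  | [_] => 0
  | a :: b :: rest =>
    if a = b then 1 + altGo (rest.dropWhile (· = a))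
    else altGo (b :: rest)
termination_by xs => xs.length
decreasing_by
  · have := List.length_dropWhile_le (fun x => decide (x = a)) rest
    simp at this ⊢; omega
  · simp

def count_clumps_alt (nums : List Int) : Int := altGo nums

-- ===== PRECONDITION & SPEC =====
def Spec_count_clumps (nums : List Int) (out : Int) : Prop := out = count_clumps_alt nums
instance (nums : List Int) (out : Int) : Decidable (Spec_count_clumps nums out) := by unfold Spec_count_clumps; infer_instance

-- ===== CLAIM (what is proved, stated in full; the proofs are below) =====
def Claim_equal_count_clumps : Prop := ∀ (nums : List Int), Dom_count_clumps nums → Spec_count_clumps nums (count_clumps nums)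

-- ===== LEMMAS AND PROOFS =====

-- A's result, starting the fold from an arbitrary state.
def aRun (st : Option Int × Int × Int) (xs : List Int) : Int :=
  match xs.foldl aStep st with
  | (_, cnt, groups) => if cnt > 1 then groups + 1 else groups

-- Combined invariant, by strong induction on the length of the remaining list:
--  L1: from state (some x, 1, g) the fold computes g + altGo (x :: xs);
--  L2: from state (some x, c, g) with c ≥ 2 (inside a run of x's) it computes
--      g + 1 + altGo of the list with the rest of the run dropped.
theorem aRun_altGo (n : Nat) :
    ∀ xs : List Int, xs.length ≤ n →
      (∀ x g, aRun (some x, 1, g) xs = g + altGo (x :: xs)) ∧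
      (∀ x c g, c ≥ 2 → aRun (some x, c, g) xs = g + 1 + altGo (xs.dropWhile (· = x))) := by
  induction n with
  | zero =>
    intro xs hlen
    have hxs : xs = [] := List.eq_nil_of_length_eq_zero (Nat.le_zero.mp hlen)
    subst hxs
    constructor
    · intro x g; simp [aRun, altGo]
    · intro x c g hc; simp [aRun, altGo]; omega
  | succ n ih =>
    intro xs hlen
    match xs with
    | [] =>
      constructor
      · intro x g; simp [aRun, altGo]
      · intro x c g hc; simp [aRun, altGo]; omega
    | y :: ys =>
      have hys : ys.length ≤ n := by simpa using Nat.lt_succ_iff.mp (Nat.lt_of_lt_of_le (by simp) hlen)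
      constructor
      · intro x g
        by_cases hxy : x = y
        · subst hxy
          have h2 := (ih ys hys).2 x 2 g (by omega)
          simp [aRun, aStep, List.foldl] at h2 ⊢
          simp [altGo]
          omega
        · have h1 := (ih ys hys).1 y g
          simp [aRun, aStep, List.foldl, hxy] at h1 ⊢
          simp [altGo, hxy]
          omega
      · intro x c g hc
        by_cases hxy : x = y
        · subst hxy
          have h2 := (ih ys hys).2 x (c + 1) g (by omega)
          simp [aRun, aStep, List.foldl] at h2 ⊢
          omega
        · have h1 := (ih ys hys).1 y (g + 1)
          have hcgt : c > 1 := hc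
          simp [aRun, aStep, List.foldl, hxy, hcgt] at h1 ⊢
          rw [List.dropWhile_cons_of_neg (by simp [Ne.symm hxy])]
          omega

-- ===== VERDICT (by name: the statement is the Claim_ definition above) =====
theorem count_clumps_spec : Claim_equal_count_clumps := by
  intro nums _
  show count_clumps nums = count_clumps_alt nums
  match nums with
  | [] => simp [count_clumps, count_clumps_alt, altGo]
  | x :: xs =>
    have h := (aRun_altGo xs.length xs (le_refl _)).1 x 0
    simp [count_clumps, count_clumps_alt, aRun, aStep, List.foldl] at h ⊢
    omega
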